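-- pv_equiv track=rewrite | github.com/Yqno/USB-Autorun-Creator | main.py | generate_autorun_content
-- ===== SOURCE A (Python) =====
-- def to_lowercase(text: str) -> str:
--     """Convert a string to lowercase."""
--     return text.lower()
--
-- def generate_autorun_content(filename: str) -> str:
--     """Generate the content for the autorun.inf file based on file extension."""
--     ext = to_lowercase(filename)
--
--     # Define file type mappings
--     file_type_actions = {
--         ".exe": lambda f: f"[autorun]\nOpen={f}\nUseAutoPlay=1",
--         ".zip": lambda f: f"[autorun]\nShellExecute=explorer.exe {f}\nUseAutoPlay=1",
--         (".jpg", ".jpeg", ".png", ".bmp", ".gif"): lambda f: f"[autorun]\nShellExecute={f}\nUseAutoPlay=1",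
--         ".py": lambda f: f"[autorun]\nShellExecute=pythonw.exe {f}\nUseAutoPlay=1",
--         ".jar": lambda f: f"[autorun]\nShellExecute=javaw.exe -jar {f}\nUseAutoPlay=1",
--         ".bat": lambda f: f"[autorun]\nShellExecute={f}\nUseAutoPlay=1",
--         ".ps1": lambda f: f"[autorun]\nShellExecute=powershell.exe -ExecutionPolicy Bypass -File {f}\nUseAutoPlay=1"
--     }
--
--     # Check for exact match
--     for key, action in file_type_actions.items():
--         if isinstance(key, tuple):
--             if ext.endswith(key):
--                 return action(filename)
--         elif ext.endswith(key):
--             return action(filename)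
--
--     raise ValueError("Unsupported file type. Please use an executable, ZIP file, image, Python script, Java JAR, CMD batch file, or PowerShell script.")
-- ===== SOURCE B (Python) =====
-- def generate_autorun_content(filename: str) -> str:
--     """Generate the content for the autorun.inf file based on file extension."""
--     templates = {
--         ".exe": ("[autorun]\nOpen=", "\nUseAutoPlay=1"),
--         ".zip": ("[autorun]\nShellExecute=explorer.exe ", "\nUseAutoPlay=1"),
--         ".jpg": ("[autorun]\nShellExecute=", "\nUseAutoPlay=1"),
--         ".jpeg": ("[autorun]\nShellExecute=", "\nUseAutoPlay=1"),
--         ".png": ("[autorun]\nShellExecute=", "\nUseAutoPlay=1"),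
--         ".bmp": ("[autorun]\nShellExecute=", "\nUseAutoPlay=1"),
--         ".gif": ("[autorun]\nShellExecute=", "\nUseAutoPlay=1"),
--         ".py": ("[autorun]\nShellExecute=pythonw.exe ", "\nUseAutoPlay=1"),
--         ".jar": ("[autorun]\nShellExecute=javaw.exe -jar ", "\nUseAutoPlay=1"),
--         ".bat": ("[autorun]\nShellExecute=", "\nUseAutoPlay=1"),
--         ".ps1": ("[autorun]\nShellExecute=powershell.exe -ExecutionPolicy Bypass -File ", "\nUseAutoPlay=1"),
--     }
--     low = filename.lower()
--     dot = low.rfind(".")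
--     ext = low[dot:] if dot != -1 else ""
--     if ext not in templates:
--         raise ValueError("Unsupported file type. Please use an executable, ZIP file, image, Python script, Java JAR, CMD batch file, or PowerShell script.")
--     prefix, suffix = templates[ext]
--     return prefix + filename + suffix
-- ===== Notes on version B (the rewrite author's own statement) =====
-- stated objective: simpler
-- what changed: Replaces the ordered endswith-scan over a dict of lambdas (with a tuple key) by extracting the lowercased extension once via rfind of the dot and doing a single lookup in a flat extension-to-(prefix,suffix) table; the identical ValueError is raised on a miss.
import Mathlib
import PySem

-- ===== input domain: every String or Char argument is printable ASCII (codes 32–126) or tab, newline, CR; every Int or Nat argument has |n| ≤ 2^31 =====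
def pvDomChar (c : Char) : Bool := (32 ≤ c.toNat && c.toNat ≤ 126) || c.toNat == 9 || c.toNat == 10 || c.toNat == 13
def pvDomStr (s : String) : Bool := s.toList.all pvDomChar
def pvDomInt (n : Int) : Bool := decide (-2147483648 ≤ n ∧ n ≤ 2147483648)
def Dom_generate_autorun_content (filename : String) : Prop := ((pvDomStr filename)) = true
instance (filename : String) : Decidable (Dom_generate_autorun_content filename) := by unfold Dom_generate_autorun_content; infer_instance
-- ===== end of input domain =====

-- B replaces A's ordered endswith-scan over a dict of lambdas by extracting the
-- lowercased extension once (rfind('.')) and one flat table lookup: simpler.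
-- Where the Python raises ValueError (unsupported extension) both ports return ""
-- and those inputs are excluded by Pre_.

-- ===== PORT A =====
-- to_lowercase(text) = text.lower()
def to_lowercase (text : String) : String := PySem.Str.lower text

def generate_autorun_content (filename : String) : String :=
  let ext := to_lowercase filename
  if PySem.Str.endswith ext ".exe" then
    "[autorun]\nOpen=" ++ filename ++ "\nUseAutoPlay=1"
  else if PySem.Str.endswith ext ".zip" then
    "[autorun]\nShellExecute=explorer.exe " ++ filename ++ "\nUseAutoPlay=1"
  else if (PySem.Str.endswith ext ".jpg" || PySem.Str.endswith ext ".jpeg" ||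
           PySem.Str.endswith ext ".png" || PySem.Str.endswith ext ".bmp" ||
           PySem.Str.endswith ext ".gif") then
    "[autorun]\nShellExecute=" ++ filename ++ "\nUseAutoPlay=1"
  else if PySem.Str.endswith ext ".py" then
    "[autorun]\nShellExecute=pythonw.exe " ++ filename ++ "\nUseAutoPlay=1"
  else if PySem.Str.endswith ext ".jar" then
    "[autorun]\nShellExecute=javaw.exe -jar " ++ filename ++ "\nUseAutoPlay=1"
  else if PySem.Str.endswith ext ".bat" then
    "[autorun]\nShellExecute=" ++ filename ++ "\nUseAutoPlay=1"
  else if PySem.Str.endswith ext ".ps1" then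
    "[autorun]\nShellExecute=powershell.exe -ExecutionPolicy Bypass -File " ++ filename ++ "\nUseAutoPlay=1"
  else
    ""  -- Python raises ValueError here; excluded by Pre_

-- ===== PORT B =====
def pvTemplates : PySem.Dict String (String × String) := PySem.Dict.mk
  [ (".exe",  ("[autorun]\nOpen=", "\nUseAutoPlay=1")),
    (".zip",  ("[autorun]\nShellExecute=explorer.exe ", "\nUseAutoPlay=1")),
    (".jpg",  ("[autorun]\nShellExecute=", "\nUseAutoPlay=1")),
    (".jpeg", ("[autorun]\nShellExecute=", "\nUseAutoPlay=1")),
    (".png",  ("[autorun]\nShellExecute=", "\nUseAutoPlay=1")),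
    (".bmp",  ("[autorun]\nShellExecute=", "\nUseAutoPlay=1")),
    (".gif",  ("[autorun]\nShellExecute=", "\nUseAutoPlay=1")),
    (".py",   ("[autorun]\nShellExecute=pythonw.exe ", "\nUseAutoPlay=1")),
    (".jar",  ("[autorun]\nShellExecute=javaw.exe -jar ", "\nUseAutoPlay=1")),
    (".bat",  ("[autorun]\nShellExecute=", "\nUseAutoPlay=1")),
    (".ps1",  ("[autorun]\nShellExecute=powershell.exe -ExecutionPolicy Bypass -File ", "\nUseAutoPlay=1")) ]

def generate_autorun_content_alt (filename : String) : String :=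
  let low := PySem.Str.lower filename
  let dot := PySem.Str.rfind low "."
  let ext := if dot ≠ -1 then PySem.Str.slice low (some dot) none else ""
  match pvTemplates.get? ext with
  | some (pre, suf) => pre ++ filename ++ suf
  | none => ""  -- Python raises ValueError here; excluded by Pre_

-- ===== PRECONDITION & SPEC =====
-- Pre_ excludes exactly the inputs on which the Python A raises ValueError
-- (the lowercased filename ends with none of the supported extensions).
def Pre_generate_autorun_content (filename : String) : Prop :=
  (PySem.Str.endswith (PySem.Str.lower filename) ".exe" ||
   PySem.Str.endswith (PySem.Str.lower filename) ".zip" ||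
   PySem.Str.endswith (PySem.Str.lower filename) ".jpg" ||
   PySem.Str.endswith (PySem.Str.lower filename) ".jpeg" ||
   PySem.Str.endswith (PySem.Str.lower filename) ".png" ||
   PySem.Str.endswith (PySem.Str.lower filename) ".bmp" ||
   PySem.Str.endswith (PySem.Str.lower filename) ".gif" ||
   PySem.Str.endswith (PySem.Str.lower filename) ".py" ||
   PySem.Str.endswith (PySem.Str.lower filename) ".jar" ||
   PySem.Str.endswith (PySem.Str.lower filename) ".bat" ||
   PySem.Str.endswith (PySem.Str.lower filename) ".ps1") = true
instance (filename : String) : Decidable (Pre_generate_autorun_content filename) := by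
  unfold Pre_generate_autorun_content; infer_instance

def pvWitness_generate_autorun_content : String := "Setup.EXE"

def Spec_generate_autorun_content (filename : String) (out : String) : Prop := out = generate_autorun_content_alt filename
instance (filename : String) (out : String) : Decidable (Spec_generate_autorun_content filename out) := by unfold Spec_generate_autorun_content; infer_instance

-- ===== CLAIM (what is proved, stated in full; the proofs are below) =====
def Claim_equal_generate_autorun_content : Prop := ∀ (filename : String), Dom_generate_autorun_content filename → Pre_generate_autorun_content filename → Spec_generate_autorun_content filename (generate_autorun_content filename)

-- ===== LEMMAS AND PROOFS =====

theorem pfx_dot (l : List Char) : ['.'].isPrefixOf l = true ↔ l.head? = some '.' := by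
  cases l with
  | nil => simp [List.isPrefixOf]
  | cons a t =>
      simp only [List.isPrefixOf, Bool.and_true, beq_iff_eq, List.head?_cons, Option.some.injEq]
      exact ⟨fun h => h.symm, fun h => h.symm⟩

theorem pv_go_spec (s : List Char) (m : Nat) (hm : s[m]? = some '.') :
    ∀ j, m ≤ j → (∀ i, m < i → i ≤ j → s[i]? ≠ some '.') →
    PySem.Chars.rfind.go s ['.'] j = (m : Int) := by
  intro j
  induction j with
  | zero =>
      intro hmj _
      interval_cases m
      rw [PySem.Chars.rfind.go]
      have h0 : ['.'].isPrefixOf s = true := by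
        rw [pfx_dot, List.head?_eq_getElem?]; exact hm
      simp [h0]
  | succ j ih =>
      intro hmj hup
      rw [PySem.Chars.rfind.go]
      by_cases hcase : m = j + 1
      · subst hcase
        have h1 : ['.'].isPrefixOf (s.drop (j+1)) = true := by
          rw [pfx_dot, List.head?_drop]; exact hm
        have h2 : ['.'] <+: s.drop (j+1) := List.isPrefixOf_iff_prefix.mp h1
        simp [h2]
      · have hne : s[j+1]? ≠ some '.' := hup (j+1) (by omega) (by omega)
        have h1 : ['.'].isPrefixOf (s.drop (j+1)) = false := by
          rw [← Bool.not_eq_true]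
          intro hp
          exact hne (by rwa [pfx_dot, List.head?_drop] at hp)
        rw [if_neg (by simp [h1])]
        exact ih (by omega) (fun i a b => hup i a (by omega))

theorem pv_rfind_dot (p w : List Char) (hw : '.' ∉ w) :
    PySem.Chars.rfind (p ++ '.' :: w) ['.'] = (p.length : Int) := by
  unfold PySem.Chars.rfind
  apply pv_go_spec
  · rw [List.getElem?_append_right (Nat.le_refl _)]
    simp
  · simp
  · intro i h1 h2 hcon
    have hlen : (p ++ '.' :: w).length = p.length + w.length + 1 := by simp; omega
    by_cases hi : i < (p ++ '.' :: w).length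
    · rw [List.getElem?_append_right (by omega)] at hcon
      have hd : i - p.length = (i - p.length - 1) + 1 := by omega
      rw [hd, List.getElem?_cons_succ] at hcon
      have : i - p.length - 1 < w.length := by omega
      rw [List.getElem?_eq_getElem this] at hcon
      exact hw (Option.some.inj hcon ▸ List.getElem_mem this)
    · rw [List.getElem?_eq_none (by omega)] at hcon
      simp at hcon

theorem pv_ext_eq (low k : String) (w : List Char) (hk : k.toList = '.' :: w) (hw : '.' ∉ w)
    (h : PySem.Str.endswith low k = true) :
    PySem.Str.rfind low "." ≠ -1 ∧
    PySem.Str.slice low (some (PySem.Str.rfind low ".")) none = k := by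
  have hsfx : k.toList <:+ low.toList := by
    rw [PySem.Str.endswith] at h
    exact (PySem.Chars.endswith_iff _ _).mp h
  obtain ⟨p, hp⟩ := hsfx
  have hrf : PySem.Str.rfind low "." = (p.length : Int) := by
    rw [PySem.Str.rfind_eq]
    show PySem.Chars.rfind low.toList ['.'] = _
    rw [← hp, hk]
    exact pv_rfind_dot p w hw
  refine ⟨by rw [hrf]; omega, ?_⟩
  rw [hrf, ← String.toList_inj, PySem.Str.toList_slice,
    PySem.Chars.slice_eq_listSlice, PySem.List.slice_from_natCast, ← hp,
    List.drop_left]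

theorem pv_alt_branch (filename k : String) (w : List Char) (pre suf : String)
    (hk : k.toList = '.' :: w) (hw : '.' ∉ w)
    (hget : pvTemplates.get? k = some (pre, suf))
    (h : PySem.Str.endswith (PySem.Str.lower filename) k = true) :
    generate_autorun_content_alt filename = pre ++ filename ++ suf := by
  obtain ⟨hdot, hext⟩ := pv_ext_eq _ k w hk hw h
  unfold generate_autorun_content_alt
  simp only []
  rw [if_pos hdot, hext, hget]

-- ===== VERDICT (by name: the statement is the Claim_ definition above) =====

theorem generate_autorun_content_spec : Claim_equal_generate_autorun_content := by
  intro filename _ hpre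
  unfold Spec_generate_autorun_content generate_autorun_content to_lowercase
  simp only []
  split_ifs with h1 h2 h3 h4 h5 h6 h7
  · exact (pv_alt_branch filename ".exe" "exe".toList _ _ rfl (by decide) rfl h1).symm
  · exact (pv_alt_branch filename ".zip" "zip".toList _ _ rfl (by decide) rfl h2).symm
  · simp only [Bool.or_eq_true] at h3
    rcases h3 with (((h | h) | h) | h) | h
    · exact (pv_alt_branch filename ".jpg" "jpg".toList _ _ rfl (by decide) rfl h).symm
    · exact (pv_alt_branch filename ".jpeg" "jpeg".toList _ _ rfl (by decide) rfl h).symm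
    · exact (pv_alt_branch filename ".png" "png".toList _ _ rfl (by decide) rfl h).symm
    · exact (pv_alt_branch filename ".bmp" "bmp".toList _ _ rfl (by decide) rfl h).symm
    · exact (pv_alt_branch filename ".gif" "gif".toList _ _ rfl (by decide) rfl h).symm
  · exact (pv_alt_branch filename ".py" "py".toList _ _ rfl (by decide) rfl h4).symm
  · exact (pv_alt_branch filename ".jar" "jar".toList _ _ rfl (by decide) rfl h5).symm
  · exact (pv_alt_branch filename ".bat" "bat".toList _ _ rfl (by decide) rfl h6).symm
  · exact (pv_alt_branch filename ".ps1" "ps1".toList _ _ rfl (by decide) rfl h7).symm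
  · exfalso
    unfold Pre_generate_autorun_content at hpre
    simp only [Bool.or_eq_true] at hpre h3
    push Not at h3
    rcases hpre with (((((((((h | h) | h) | h) | h) | h) | h) | h) | h) | h) | h <;> simp_all
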